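-- pv_equiv track=rewrite | github.com/mohos26/Challenges | Edabit/Python/Expert/Casual String Builder.py | select_num
-- ===== SOURCE A (Python) =====
-- def select_num(txt):
--     res = ''
--     for i in txt[::-1]:
--         if i.isdigit():
--             res += i
--         else:
--             break
--     return int(res[::-1])
-- ===== SOURCE B (Python) =====
-- def select_num(txt):
--     i = len(txt)
--     while i > 0 and txt[i - 1].isdigit():
--         i -= 1
--     return int(txt[i:])
-- ===== Notes on version B (the rewrite author's own statement) =====
-- stated objective: simpler
-- what changed: B finds the start index of the trailing digit run with a backward index scan and converts the suffix slice directly, instead of reversing the string, accumulating digits into a new string and reversing that accumulator again.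
import Mathlib
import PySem

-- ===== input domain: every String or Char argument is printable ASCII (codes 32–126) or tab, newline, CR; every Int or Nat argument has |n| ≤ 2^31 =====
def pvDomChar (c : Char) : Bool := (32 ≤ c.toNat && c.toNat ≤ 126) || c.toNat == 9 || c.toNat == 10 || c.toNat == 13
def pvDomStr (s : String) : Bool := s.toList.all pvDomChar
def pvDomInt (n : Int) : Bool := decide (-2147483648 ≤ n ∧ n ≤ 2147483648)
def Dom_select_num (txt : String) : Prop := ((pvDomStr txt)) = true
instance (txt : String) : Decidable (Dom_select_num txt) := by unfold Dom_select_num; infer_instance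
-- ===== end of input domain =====

-- B computes the start index of the trailing digit run by a backward index scan and
-- converts the suffix slice directly, instead of A's reverse/accumulate/reverse; objective: simpler.


-- ===== PORT A =====
-- the for-loop with break: accumulate digits from the reversed character list, stop at the first non-digit
def aLoop (rev : List Char) : List Char :=
  match rev with
  | [] => []
  | c :: rest => if PySem.Chars.isdigit c then c :: aLoop rest else []

-- int(res[::-1]); Pre_ excludes the inputs where Python's int('') raises ValueError (ofChars? = none there)
def select_num (txt : String) : Int :=
  (PySem.Int.ofChars? (aLoop txt.toList.reverse).reverse).getD 0

-- ===== PORT B =====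
-- while i > 0 and txt[i-1].isdigit(): i -= 1   (structural recursion on i)
def bLoop (l : List Char) : Nat → Nat
  | 0 => 0
  | i + 1 => if (l[i]?.elim false PySem.Chars.isdigit) then bLoop l i else i + 1

-- int(txt[i:])
def select_num_alt (txt : String) : Int :=
  (PySem.Int.ofChars? (txt.toList.drop (bLoop txt.toList txt.toList.length))).getD 0

-- ===== PRECONDITION & SPEC =====
-- Pre_ excludes exactly the inputs on which A raises ValueError: no trailing digit, where int() of the empty digit run raises
def Pre_select_num (txt : String) : Prop :=
  (txt.toList.getLast?.elim false PySem.Chars.isdigit) = true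
instance (txt : String) : Decidable (Pre_select_num txt) := by unfold Pre_select_num; infer_instance

def pvWitness_select_num : String := "abc123"

def Spec_select_num (txt : String) (out : Int) : Prop := out = select_num_alt txt
instance (txt : String) (out : Int) : Decidable (Spec_select_num txt out) := by unfold Spec_select_num; infer_instance

-- ===== CLAIM (what is proved, stated in full; the proofs are below) =====
def Claim_equal_select_num : Prop := ∀ (txt : String), Dom_select_num txt → Pre_select_num txt → Spec_select_num txt (select_num txt)

-- ===== LEMMAS AND PROOFS =====

-- A's accumulator is takeWhile on the reversed list
theorem aLoop_eq_takeWhile (rev : List Char) :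
    aLoop rev = rev.takeWhile PySem.Chars.isdigit := by
  induction rev with
  | nil => rfl
  | cons c rest ih => rw [aLoop, List.takeWhile_cons, ih]

-- B's loop value: i minus the length of the maximal digit suffix of the first i characters
theorem bLoop_eq (l : List Char) (i : Nat) (hi : i ≤ l.length) :
    bLoop l i = i - ((l.take i).reverse.takeWhile PySem.Chars.isdigit).length := by
  induction i with
  | zero => simp [bLoop]
  | succ j ih =>
    have hj : j < l.length := hi
    have htake : l.take (j + 1) = l.take j ++ [l[j]] := List.take_succ_eq_append_getElem hj
    have hget : l[j]? = some l[j] := List.getElem?_eq_getElem hj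
    by_cases hd : PySem.Chars.isdigit l[j]
    · have hlen : ((l.take j).reverse.takeWhile PySem.Chars.isdigit).length ≤ j := by
        calc ((l.take j).reverse.takeWhile PySem.Chars.isdigit).length
            ≤ (l.take j).reverse.length := (List.takeWhile_sublist _).length_le
          _ ≤ j := by simp [List.length_take]
      have : bLoop l (j + 1) = bLoop l j := by simp [bLoop, hget, hd]
      rw [this, ih (Nat.le_of_lt hj), htake]
      simp only [List.reverse_append, List.reverse_cons, List.reverse_nil, List.nil_append,
        List.singleton_append, List.takeWhile_cons, hd, if_true, List.length_cons]
      omega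
    · have : bLoop l (j + 1) = j + 1 := by simp [bLoop, hget, hd]
      rw [this, htake]
      simp only [List.reverse_append, List.reverse_cons, List.reverse_nil, List.nil_append,
        List.singleton_append, List.takeWhile_cons, hd, Bool.false_eq_true, if_false,
        List.length_nil, Nat.sub_zero]

-- both final strings are the maximal digit suffix
theorem suffix_eq (l : List Char) :
    l.drop (bLoop l l.length) = (l.reverse.takeWhile PySem.Chars.isdigit).reverse := by
  rw [bLoop_eq l l.length (le_refl _), List.take_length]
  set b := l.reverse.takeWhile PySem.Chars.isdigit with hb
  set a := l.reverse.dropWhile PySem.Chars.isdigit with ha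
  have hsplit : l.reverse = b ++ a := (List.takeWhile_append_dropWhile).symm
  have hl : l = a.reverse ++ b.reverse := by
    conv_lhs => rw [← l.reverse_reverse, hsplit]
    simp
  have hlen : l.length - b.length = a.reverse.length := by
    have := congrArg List.length hsplit
    simp at this ⊢
    omega
  rw [hlen, hl, List.drop_left]

-- ===== VERDICT (by name: the statement is the Claim_ definition above) =====
theorem select_num_spec : Claim_equal_select_num := by
  intro txt _ _
  unfold Spec_select_num select_num select_num_alt
  rw [aLoop_eq_takeWhile, suffix_eq]
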